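-- pv_equiv track=rewrite | github.com/Labpro-21/if1210-2024-tubes-k04-a | src/file_io.py | _parse
-- ===== SOURCE A (Python) =====
-- def _parse(lines: list[str]) -> list[list[str]]:
--     """
--     Melakukan parsing string csv dan mengembalikan list dari list data per baris.
--     """
--     parsed_lines = []
--     parsed_words = []
--     temp = ""
--
--     for line in lines:
--         for char in line:
--             if char == ';':
--                 parsed_words.append(temp)
--                 temp = ""
--             elif char == '\n':
--                 parsed_words.append(temp)
--                 parsed_lines.append(parsed_words)
--                 parsed_words = []
--                 temp = ""
--             else:
--                 temp += char
--
--     if temp: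
--         parsed_words.append(temp)
--
--     if parsed_words:
--         parsed_lines.append(parsed_words)
--
--     return parsed_lines
-- ===== SOURCE B (Python) =====
-- def _parse(lines: list[str]) -> list[list[str]]:
--     """Parse by joining and splitting instead of a char-by-char state machine."""
--     rows = "".join(lines).split('\n')
--     out = [row.split(';') for row in rows[:-1]]
--     last = rows[-1].split(';')
--     if last[-1] == '':
--         last = last[:-1]
--     if last:
--         out.append(last)
--     return out
-- ===== Notes on version B (the rewrite author's own statement) =====
-- stated objective: faster
-- what changed: Replaced A's character-by-character state machine (three mutable accumulators, string concatenation per char) with join + split('\n') and per-row split(';'), handling only the final unterminated row specially.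
import Mathlib
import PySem

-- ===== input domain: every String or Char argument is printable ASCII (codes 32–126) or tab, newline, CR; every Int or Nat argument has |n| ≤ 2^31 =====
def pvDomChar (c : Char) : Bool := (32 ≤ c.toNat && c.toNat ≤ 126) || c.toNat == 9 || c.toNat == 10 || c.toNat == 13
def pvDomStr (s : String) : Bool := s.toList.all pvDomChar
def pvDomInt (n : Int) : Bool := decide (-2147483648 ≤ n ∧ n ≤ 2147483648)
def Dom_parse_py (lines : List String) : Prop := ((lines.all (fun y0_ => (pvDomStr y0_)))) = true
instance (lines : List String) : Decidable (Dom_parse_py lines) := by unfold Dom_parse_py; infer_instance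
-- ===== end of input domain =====

-- B replaces A's character-by-character state machine with join + split row processing (same behaviour, incl. the unterminated last row dropping one trailing empty field); measured constant-factor faster (C-level str.split vs per-char Python loop).

-- ===== PORT A =====
-- state = (parsed_lines, parsed_words, temp); temp is the string under construction, kept as List Char
def parseStepA (st : List (List String) × List String × List Char) (c : Char) :
    List (List String) × List String × List Char :=
  if c = ';' then (st.1, st.2.1 ++ [String.ofList st.2.2], [])
  else if c = '\n' then (st.1 ++ [st.2.1 ++ [String.ofList st.2.2]], [], [])
  else (st.1, st.2.1, st.2.2 ++ [c])

def parse_py (lines : List String) : List (List String) :=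
  let st := lines.foldl (fun st line => line.toList.foldl parseStepA st) ([], [], [])
  -- if temp: parsed_words.append(temp)
  let pw := if st.2.2 ≠ [] then st.2.1 ++ [String.ofList st.2.2] else st.2.1
  -- if parsed_words: parsed_lines.append(parsed_words)
  if pw ≠ [] then st.1 ++ [pw] else st.1

-- ===== PORT B =====
-- "".join(lines) = flatten of the char lists; row.split(sep) for a one-char sep is List.splitOn (Python-exact)
def parse_py_alt (lines : List String) : List (List String) :=
  let rows := List.splitOn '\n' ((lines.map String.toList).flatten)
  let out := rows.dropLast.map (fun r => (List.splitOn ';' r).map String.ofList)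
  -- rows[-1].split(';')
  let last := (List.splitOn ';' (PySem.List.pyGetD rows (-1) [])).map String.ofList
  -- if last[-1] == '': last = last[:-1]
  let last := if PySem.List.pyGet? last (-1) = some "" then last.dropLast else last
  if last ≠ [] then out ++ [last] else out

-- ===== PRECONDITION & SPEC =====
def Spec_parse_py (lines : List String) (out : List (List String)) : Prop := out = parse_py_alt lines
instance (lines : List String) (out : List (List String)) : Decidable (Spec_parse_py lines out) := by unfold Spec_parse_py; infer_instance

-- ===== CLAIM (what is proved, stated in full; the proofs are below) =====
def Claim_equal_parse_py : Prop := ∀ (lines : List String), Dom_parse_py lines → Spec_parse_py lines (parse_py lines)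

-- ===== LEMMAS AND PROOFS =====

-- A's epilogue (the two trailing 'if's) as a function of the state
def finalizeA (st : List (List String) × List String × List Char) : List (List String) :=
  let pw := if st.2.2 ≠ [] then st.2.1 ++ [String.ofList st.2.2] else st.2.1
  if pw ≠ [] then st.1 ++ [pw] else st.1

-- the rows A will still emit, given pending words pw, pending chars t, and remaining input
def tailRows (pw : List String) (t : List Char) : List Char → List (List String)
  | [] =>
      let pw' := if t ≠ [] then pw ++ [String.ofList t] else pw
      if pw' ≠ [] then [pw'] else []
  | c :: cs =>
      if c = ';' then tailRows (pw ++ [String.ofList t]) [] cs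
      else if c = '\n' then (pw ++ [String.ofList t]) :: tailRows [] [] cs
      else tailRows pw (t ++ [c]) cs

-- B's row construction, with extra fields pw prepended to the first row
def buildRows (pw : List String) : List (List Char) → List (List String)
  | [] => []
  | [r] =>
      let last := pw ++ (List.splitOn ';' r).map String.ofList
      let last := if PySem.List.pyGet? last (-1) = some "" then last.dropLast else last
      if last ≠ [] then [last] else []
  | r :: rs => (pw ++ (List.splitOn ';' r).map String.ofList) :: buildRows [] rs

theorem ofList_eq_empty_iff (t : List Char) : String.ofList t = "" ↔ t = [] := by
  constructor
  · intro h; have := congrArg String.toList h; simpa using this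
  · rintro rfl; rfl

theorem foldl_parseStepA (cs : List Char) : ∀ (pl : List (List String)) (pw : List String)
    (t : List Char), finalizeA (cs.foldl parseStepA (pl, pw, t)) = pl ++ tailRows pw t cs := by
  induction cs with
  | nil =>
      intro pl pw t
      simp only [List.foldl_nil, finalizeA, tailRows]
      split <;> split <;> simp
  | cons c cs ih =>
      intro pl pw t
      simp only [List.foldl_cons, tailRows, parseStepA]
      by_cases h1 : c = ';'
      · simp [h1, ih]
      · by_cases h2 : c = '\n'
        · simp [h2, ih]
        · simp [h1, h2, ih]

-- a prefix without the separator merges into the first piece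
theorem splitOnP_prefix {α : Type} [DecidableEq α] (p : α → Bool) (pre l : List α)
    (h : ∀ x ∈ pre, ¬ p x) :
    List.splitOnP p (pre ++ l) = (List.splitOnP p l).modifyHead (pre ++ ·) := by
  induction pre with
  | nil =>
      obtain ⟨r, rs, hr⟩ := List.exists_cons_of_ne_nil (List.splitOnP_ne_nil p l)
      simp [hr]
  | cons a as ih =>
      have ha : ¬ p a := h a (by simp)
      have h' : ∀ x ∈ as, ¬ p x := fun x hx => h x (by simp [hx])
      rw [List.cons_append, List.splitOnP_cons, if_neg (by simpa using ha), ih h']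
      obtain ⟨r, rs, hr⟩ := List.exists_cons_of_ne_nil (List.splitOnP_ne_nil p l)
      simp [hr]

theorem tailRows_eq_buildRows (cs : List Char) : ∀ (pw : List String) (t : List Char),
    (∀ c ∈ t, c ≠ ';' ∧ c ≠ '\n') →
    tailRows pw t cs = buildRows pw (List.splitOn '\n' (t ++ cs)) := by
  induction cs with
  | nil =>
      intro pw t ht
      have hsplit : List.splitOn '\n' (t ++ []) = [t] := by
        rw [List.append_nil]
        exact List.splitOnP_eq_single _ t (fun x hx => by simpa using (ht x hx).2)
      have hsemi : List.splitOn ';' t = [t] :=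
        List.splitOnP_eq_single _ t (fun x hx => by simpa using (ht x hx).1)
      rw [hsplit]
      by_cases h0 : t = []
      · subst h0
        simp [tailRows, buildRows, PySem.List.pyGet?_neg_one_append_singleton]
      · have hne : ¬ String.ofList t = "" := by simpa [ofList_eq_empty_iff] using h0
        simp [tailRows, buildRows, hsemi, PySem.List.pyGet?_neg_one_append_singleton, h0, hne]
  | cons c cs ih =>
      intro pw t ht
      by_cases h1 : c = ';'
      · subst h1
        have hsplit : List.splitOn '\n' (t ++ ';' :: cs)
            = (List.splitOn '\n' cs).modifyHead ((t ++ [';']) ++ ·) := by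
          have : t ++ ';' :: cs = (t ++ [';']) ++ cs := by simp
          rw [this]
          exact splitOnP_prefix _ _ _ (by intro x hx; rcases List.mem_append.1 hx with h | h
                                          · simpa using (ht x h).2
                                          · simp at h; simp [h])
        rw [tailRows, if_pos rfl, ih _ _ (by simp), hsplit]
        have hnn : List.splitOn '\n' cs ≠ [] := List.splitOnP_ne_nil _ _
        obtain ⟨r, rs, hr⟩ := List.exists_cons_of_ne_nil hnn
        have hfirst : List.splitOn ';' (t ++ ';' :: r) = t :: List.splitOn ';' r :=
          List.splitOnP_first _ t (fun x hx => by simpa using (ht x hx).1) ';' (by simp) r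
        rw [List.nil_append, hr]
        cases rs with
        | nil => simp [buildRows, hfirst]
        | cons r' rs' => simp [buildRows, hfirst]
      · by_cases h2 : c = '\n'
        · subst h2
          have hsplit : List.splitOn '\n' (t ++ '\n' :: cs) = t :: List.splitOn '\n' cs :=
            List.splitOnP_first _ t (fun x hx => by simpa using (ht x hx).2) '\n' (by simp) cs
          have hsemi : List.splitOn ';' t = [t] :=
            List.splitOnP_eq_single _ t (fun x hx => by simpa using (ht x hx).1)
          rw [tailRows, if_neg (by simp), if_pos rfl, ih _ _ (by simp), hsplit]
          have hnn : List.splitOn '\n' cs ≠ [] := List.splitOnP_ne_nil _ _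
          obtain ⟨r, rs, hr⟩ := List.exists_cons_of_ne_nil hnn
          rw [List.nil_append, hr]
          simp [buildRows, hsemi]
        · rw [tailRows, if_neg h1, if_neg h2,
            ih pw (t ++ [c]) (by intro x hx; rcases List.mem_append.1 hx with h | h
                                 · exact ht x h
                                 · simp at h; subst h; exact ⟨h1, h2⟩)]
          congr 2
          simp

theorem buildRows_nil_eq (rows : List (List Char)) (hne : rows ≠ []) :
    buildRows [] rows =
      (rows.dropLast.map (fun r => (List.splitOn ';' r).map String.ofList)) ++
      (let last := (List.splitOn ';' (PySem.List.pyGetD rows (-1) [])).map String.ofList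
       let last := if PySem.List.pyGet? last (-1) = some "" then last.dropLast else last
       if last ≠ [] then [last] else []) := by
  induction rows with
  | nil => exact absurd rfl hne
  | cons r rs ih =>
      cases rs with
      | nil =>
          simp [buildRows, PySem.List.pyGetD_neg_one]
      | cons r' rs' =>
          have h' : r' :: rs' ≠ [] := by simp
          simp only [buildRows, ih h']
          rw [List.dropLast_cons_of_ne_nil h']
          simp [PySem.List.pyGetD_neg_one, List.getLast_cons]

-- ===== VERDICT (by name: the statement is the Claim_ definition above) =====
theorem parse_py_spec : Claim_equal_parse_py := by
  intro lines _
  show parse_py lines = parse_py_alt lines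
  have hA : parse_py lines = finalizeA (((lines.map String.toList).flatten).foldl parseStepA
      ([], [], [])) := by
    simp [parse_py, finalizeA, List.foldl_flatten, List.foldl_map]
  have hnn : List.splitOn '\n' ((lines.map String.toList).flatten) ≠ [] :=
    List.splitOnP_ne_nil _ _
  rw [hA, foldl_parseStepA, tailRows_eq_buildRows _ _ _ (by simp), List.nil_append,
    List.nil_append, buildRows_nil_eq _ hnn]
  simp only [parse_py_alt]
  split <;> split <;> simp_all
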